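-- pv_equiv track=rewrite | github.com/anupa-perera/F1-challenge | solution/race_solver/evaluation.py | pairwise_correct_count
-- ===== SOURCE A (Python) =====
-- from typing import Callable, Sequence
--
-- def pairwise_correct_count(
--     actual_order: Sequence[str],
--     predicted_order: Sequence[str],
-- ) -> int:
--     """Count correctly ordered driver pairs for one race."""
--
--     predicted_rank = {
--         driver_id: index for index, driver_id in enumerate(predicted_order)
--     }
--     pairwise_correct = 0
--     for index, left_driver in enumerate(actual_order):
--         left_rank = predicted_rank[left_driver]
--         for right_driver in actual_order[index + 1 :]:
--             if left_rank < predicted_rank[right_driver]: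
--                 pairwise_correct += 1
--     return pairwise_correct
-- ===== SOURCE B (Python) =====
-- def _bisect_left(a, x):
--     """Index of the first element of sorted list a that is >= x (CPython's bisect_left loop)."""
--     lo, hi = 0, len(a)
--     while lo < hi:
--         mid = (lo + hi) // 2
--         if a[mid] < x:
--             lo = mid + 1
--         else:
--             hi = mid
--     return lo
--
--
-- def pairwise_correct_count(actual_order, predicted_order):
--     """Count correctly ordered driver pairs for one race.
--
--     Single pass: keep the predicted ranks seen so far in a sorted list; each
--     new driver adds (number of earlier drivers with a strictly smaller
--     predicted rank), found by binary search, instead of A's quadratic rescans.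
--     """
--     predicted_rank = {
--         driver_id: index for index, driver_id in enumerate(predicted_order)
--     }
--     seen = []
--     total = 0
--     for driver in actual_order:
--         rank = predicted_rank[driver]
--         pos = _bisect_left(seen, rank)
--         total += pos
--         seen.insert(pos, rank)
--     return total
-- ===== Notes on version B (the rewrite author's own statement) =====
-- stated objective: faster
-- what changed: Replaces A's nested rescan of the tail for every left driver with a single pass that keeps the predicted ranks seen so far in a sorted list and adds, per driver, the number of strictly smaller earlier ranks found by binary search (bisect_left/insort).
import Mathlib
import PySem

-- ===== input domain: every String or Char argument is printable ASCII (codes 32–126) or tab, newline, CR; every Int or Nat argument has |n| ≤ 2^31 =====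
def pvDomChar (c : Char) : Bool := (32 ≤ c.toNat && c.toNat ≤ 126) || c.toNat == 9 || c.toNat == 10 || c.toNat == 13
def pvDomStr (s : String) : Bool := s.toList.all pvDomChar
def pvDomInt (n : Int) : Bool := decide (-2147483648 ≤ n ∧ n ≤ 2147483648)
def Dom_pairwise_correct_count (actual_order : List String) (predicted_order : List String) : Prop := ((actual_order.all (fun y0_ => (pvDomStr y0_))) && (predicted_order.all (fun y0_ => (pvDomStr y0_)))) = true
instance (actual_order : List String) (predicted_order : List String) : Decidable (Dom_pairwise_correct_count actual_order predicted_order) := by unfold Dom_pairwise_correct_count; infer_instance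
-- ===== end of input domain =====

-- B replaces A's quadratic rescans of the tail with one pass that binary-searches a sorted
-- list of the ranks seen so far (objective: faster).

-- Both Pythons start with the identical dict comprehension {driver: index for index, driver in enumerate(predicted_order)}.
def buildRank (predicted_order : List String) : PySem.Dict String Int :=
  (PySem.List.enumerate predicted_order 0).foldl (fun d p => d.insert p.2 p.1) PySem.Dict.empty

-- predicted_rank[driver]; the KeyError on a driver absent from predicted_order is excluded by Pre_,
-- so the default 0 is never read under the precondition.
def lookupRank (pr : PySem.Dict String Int) (driver : String) : Int :=
  pr.getD driver 0

-- ===== PORT A =====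
-- inner loop: for right_driver in actual_order[index+1:]: if left_rank < predicted_rank[right_driver]: …
def innerA (pr : PySem.Dict String Int) (left_rank : Int) (rights : List String) (acc : Int) : Int :=
  rights.foldl (fun a r => if left_rank < lookupRank pr r then a + 1 else a) acc

def pairwise_correct_count (actual_order : List String) (predicted_order : List String) : Int :=
  let predicted_rank := buildRank predicted_order
  (PySem.List.enumerate actual_order 0).foldl
    (fun acc p =>
      innerA predicted_rank (lookupRank predicted_rank p.2)
        (PySem.List.slice actual_order (some (p.1 + 1)) none) acc)
    0

-- ===== PORT B =====
-- for driver in actual_order: rank = …; pos = _bisect_left(seen, rank); total += pos; seen.insert(pos, rank)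
-- (_bisect_left in Source B is CPython's bisect_left loop; ported as the prelude's PySem.List.bisectLeft.)
def altLoop (pr : PySem.Dict String Int) : List String → List Int → Int → Int
  | [], _, total => total
  | driver :: rest, seen, total =>
    let r := lookupRank pr driver
    let pos := PySem.List.bisectLeft seen r
    altLoop pr rest (PySem.List.insert seen (pos : Int) r) (total + (pos : Int))

def pairwise_correct_count_alt (actual_order : List String) (predicted_order : List String) : Int :=
  altLoop (buildRank predicted_order) actual_order [] 0

-- ===== PRECONDITION & SPEC =====
-- Pre_ excludes exactly the inputs on which Python A raises KeyError: a driver of actual_order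
-- missing from predicted_order.
def Pre_pairwise_correct_count (actual_order : List String) (predicted_order : List String) : Prop :=
  ∀ s ∈ actual_order, s ∈ predicted_order
instance (actual_order : List String) (predicted_order : List String) : Decidable (Pre_pairwise_correct_count actual_order predicted_order) := by unfold Pre_pairwise_correct_count; infer_instance

def pvWitness_pairwise_correct_count : List String × List String :=
  (["ham", "ver", "lec"], ["ver", "ham", "lec"])

def Spec_pairwise_correct_count (actual_order : List String) (predicted_order : List String) (out : Int) : Prop := out = pairwise_correct_count_alt actual_order predicted_order
instance (actual_order : List String) (predicted_order : List String) (out : Int) : Decidable (Spec_pairwise_correct_count actual_order predicted_order out) := by unfold Spec_pairwise_correct_count; infer_instance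

-- ===== CLAIM (what is proved, stated in full; the proofs are below) =====
def Claim_equal_pairwise_correct_count : Prop := ∀ (actual_order : List String) (predicted_order : List String), Dom_pairwise_correct_count actual_order predicted_order → Pre_pairwise_correct_count actual_order predicted_order → Spec_pairwise_correct_count actual_order predicted_order (pairwise_correct_count actual_order predicted_order)

-- ===== LEMMAS AND PROOFS =====

-- A's count, grouped by left element: each element counts its strictly larger successors.
def acount : List Int → Int
  | [] => 0
  | r :: rs => ((rs.countP (fun y => decide (r < y)) : Nat) : Int) + acount rs

-- B's count, grouped by new element: each element counts the strictly smaller earlier ranks s.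
def ccount : List Int → List Int → Int
  | _, [] => 0
  | s, r :: rs => ((s.countP (fun y => decide (y < r)) : Nat) : Int) + ccount (r :: s) rs

-- cross pairs: Σ_{y ∈ rs} #{z ∈ s | z < y}
def cross : List Int → List Int → Int
  | _, [] => 0
  | s, y :: rs => ((s.countP (fun z => decide (z < y)) : Nat) : Int) + cross s rs

theorem ccount_perm {s s' : List Int} (h : s.Perm s') : ∀ rs, ccount s rs = ccount s' rs := by
  intro rs
  induction rs generalizing s s' with
  | nil => rfl
  | cons r rs ih =>
    simp only [ccount, h.countP_eq, ih (h.cons r)]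

theorem cross_cons_left (r : Int) (s rs : List Int) :
    cross (r :: s) rs = cross [r] rs + cross s rs := by
  induction rs with
  | nil => rfl
  | cons y rs ih =>
    simp only [cross, ih, List.countP_cons, List.countP_nil]
    push_cast
    ring

theorem cross_single (r : Int) (rs : List Int) :
    cross [r] rs = ((rs.countP (fun y => decide (r < y)) : Nat) : Int) := by
  induction rs with
  | nil => rfl
  | cons y rs ih =>
    simp only [cross, ih, List.countP_cons, List.countP_nil]
    by_cases h : r < y <;> simp [h]
    ring

theorem ccount_eq_cross (rs : List Int) : ∀ s, ccount s rs = cross s rs + ccount [] rs := by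
  induction rs with
  | nil => intro s; rfl
  | cons r rs ih =>
    intro s
    have h1 : ccount s (r :: rs) = ((s.countP (fun y => decide (y < r)) : Nat) : Int) + ccount (r :: s) rs := rfl
    rw [h1, ih (r :: s), cross_cons_left]
    have h2 : ccount ([] : List Int) (r :: rs) = 0 + ccount [r] rs := rfl
    rw [h2, ih [r], cross_single]
    simp only [cross]
    ring

theorem acount_eq_ccount (rs : List Int) : acount rs = ccount [] rs := by
  induction rs with
  | nil => rfl
  | cons r rs ih =>
    have h2 : ccount ([] : List Int) (r :: rs) = 0 + ccount [r] rs := rfl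
    rw [h2, ccount_eq_cross rs [r], cross_single, ← ih]
    simp only [acount]
    ring

-- a list whose first k positions satisfy p and whose others do not has countP = k
theorem countP_eq_of_split (p : Int → Bool) :
    ∀ (a : List Int) (k : Nat), k ≤ a.length →
      (∀ j (hj : j < a.length), j < k → p a[j]) →
      (∀ j (hj : j < a.length), k ≤ j → ¬ p a[j]) →
      a.countP p = k := by
  intro a
  induction a with
  | nil => intro k hk _ _; simp [Nat.le_zero.mp hk]
  | cons x a ih =>
    intro k hk h1 h2
    cases k with
    | zero =>
      simp only [List.countP_eq_zero]
      intro y hy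
      rcases List.mem_iff_getElem.mp hy with ⟨j, hj, rfl⟩
      exact fun hp => h2 j hj (Nat.zero_le j) hp
    | succ k' =>
      have hx : p x := h1 0 (by simp) (Nat.succ_pos k')
      have htail : a.countP p = k' := by
        apply ih k' (by simpa using hk)
        · intro j hj hjk
          have := h1 (j+1) (by simpa using Nat.succ_lt_succ hj) (Nat.succ_lt_succ hjk)
          simpa using this
        · intro j hj hjk
          have := h2 (j+1) (by simpa using Nat.succ_lt_succ hj) (Nat.succ_le_succ hjk)
          simpa using this
      simp [hx, htail]

-- on a sorted list, bisect_left returns the number of strictly smaller elements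
theorem bisectLeft_eq_countP (seen : List Int) (r : Int)
    (hs : seen.Pairwise (· ≤ ·)) :
    PySem.List.bisectLeft seen r = seen.countP (fun y => decide (y < r)) := by
  obtain ⟨hle, hlt, hge⟩ := PySem.List.bisectLeft_spec seen r hs
  refine (countP_eq_of_split _ seen _ hle ?_ ?_).symm
  · intro j hj hjk
    simpa using hlt j hj hjk
  · intro j hj hjk
    simp only [decide_eq_true_eq]
    exact fun h => absurd (hge j hj hjk) (not_le.mpr h)

-- inserting r at its bisect position keeps the list sorted and is a cons up to permutation
theorem insert_at_bisect (seen : List Int) (r : Int) (hs : seen.Pairwise (· ≤ ·)) :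
    (PySem.List.insert seen ((PySem.List.bisectLeft seen r : Nat) : Int) r).Pairwise (· ≤ ·) ∧
    (PySem.List.insert seen ((PySem.List.bisectLeft seen r : Nat) : Int) r).Perm (r :: seen) := by
  obtain ⟨hle, hlt, hge⟩ := PySem.List.bisectLeft_spec seen r hs
  set k := PySem.List.bisectLeft seen r with hk
  rw [PySem.List.insert_natCast seen k r hle]
  constructor
  · -- sortedness of take k ++ r :: drop k
    have htake : ∀ y ∈ seen.take k, y < r := by
      intro y hy
      rcases List.mem_iff_getElem.mp hy with ⟨j, hj, rfl⟩
      have hj' : j < k ∧ j < seen.length := by simp [List.length_take] at hj; omega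
      rw [List.getElem_take]
      exact hlt j hj'.2 hj'.1
    have hdrop : ∀ y ∈ seen.drop k, r ≤ y := by
      intro y hy
      rcases List.mem_iff_getElem.mp hy with ⟨j, hj, rfl⟩
      have hj' : k + j < seen.length := by simp [List.length_drop] at hj; omega
      rw [List.getElem_drop]
      exact hge (k + j) hj' (by omega)
    rw [List.pairwise_append]
    refine ⟨hs.sublist (List.take_sublist k seen), ?_, ?_⟩
    · rw [List.pairwise_cons]
      exact ⟨hdrop, hs.sublist (List.drop_sublist k seen)⟩
    · intro a ha b hb
      rcases List.mem_cons.mp hb with rfl | hb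
      · exact le_of_lt (htake a ha)
      · exact le_trans (le_of_lt (htake a ha)) (hdrop b hb)
  · calc (seen.take k ++ r :: seen.drop k).Perm (r :: (seen.take k ++ seen.drop k)) := List.perm_middle
      _ = (r :: seen) := by rw [List.take_append_drop]

-- B's loop computes total + ccount over the remaining ranks, for any sorted seen
theorem altLoop_eq (pr : PySem.Dict String Int) :
    ∀ (ds : List String) (seen : List Int) (total : Int), seen.Pairwise (· ≤ ·) →
      altLoop pr ds seen total = total + ccount seen (ds.map (lookupRank pr)) := by
  intro ds
  induction ds with
  | nil => intro seen total _; simp [altLoop, ccount]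
  | cons d ds ih =>
    intro seen total hs
    obtain ⟨hsort, hperm⟩ := insert_at_bisect seen (lookupRank pr d) hs
    simp only [altLoop, List.map_cons, ccount]
    rw [ih _ _ hsort, ccount_perm hperm, bisectLeft_eq_countP seen (lookupRank pr d) hs]
    ring

-- A's inner fold counts the strictly larger ranks among the given drivers
theorem innerA_eq (pr : PySem.Dict String Int) (lr : Int) (rights : List String) (acc : Int) :
    innerA pr lr rights acc
      = acc + (((rights.map (lookupRank pr)).countP (fun y => decide (lr < y)) : Nat) : Int) := by
  unfold innerA
  rw [PySem.List.foldl_ite_add_one (fun r => lr < lookupRank pr r) rights acc]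
  rw [List.countP_map]
  rfl

-- A's outer fold over enumerate, started at index i on the corresponding tail, computes acount
theorem outer_eq (pr : PySem.Dict String Int) (actual_order : List String) :
    ∀ (tail : List String) (i : Nat) (acc : Int), actual_order.drop i = tail →
      (PySem.List.enumerate tail (i : Int)).foldl
        (fun acc p =>
          innerA pr (lookupRank pr p.2)
            (PySem.List.slice actual_order (some (p.1 + 1)) none) acc) acc
      = acc + acount (tail.map (lookupRank pr)) := by
  intro tail
  induction tail with
  | nil => intro i acc _; simp [PySem.List.enumerate_nil, acount]
  | cons l tail ih =>
    intro i acc hdrop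
    have htail : actual_order.drop (i + 1) = tail := by
      have : List.drop 1 (actual_order.drop i) = tail := by rw [hdrop]; simp
      rw [List.drop_drop] at this
      exact this
    have hslice : PySem.List.slice actual_order (some ((i : Int) + 1)) none = tail := by
      have : ((i : Int) + 1) = ((i + 1 : Nat) : Int) := by push_cast; ring
      rw [this, PySem.List.slice_from_natCast, htail]
    rw [PySem.List.enumerate_cons, List.foldl_cons]
    have hi1 : (i : Int) + 1 = ((i + 1 : Nat) : Int) := by push_cast; ring
    rw [hslice, hi1, ih (i + 1) _ htail, innerA_eq]
    simp only [List.map_cons, acount]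
    ring

-- the two ports compute acount and ccount of the same rank list, which agree
theorem ports_agree (actual_order : List String) (predicted_order : List String) :
    pairwise_correct_count actual_order predicted_order
      = pairwise_correct_count_alt actual_order predicted_order := by
  unfold pairwise_correct_count pairwise_correct_count_alt
  rw [altLoop_eq (buildRank predicted_order) actual_order [] 0 (by simp)]
  have h0 : actual_order.drop 0 = actual_order := by simp
  have := outer_eq (buildRank predicted_order) actual_order actual_order 0 0 h0
  simp only [Nat.cast_zero] at this
  rw [this, acount_eq_ccount]

-- ===== VERDICT (by name: the statement is the Claim_ definition above) =====
theorem pairwise_correct_count_spec : Claim_equal_pairwise_correct_count := by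
  intro actual_order predicted_order _ _
  unfold Spec_pairwise_correct_count
  exact ports_agree actual_order predicted_order
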